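-- pv_equiv track=rewrite | github.com/kahuku/competitive_programming | codesignal/matrix_pattern_matching.py | solution
-- ===== SOURCE A (Python) =====
-- def is_match(matrix, pattern):
--     d = {}
--     s = set()
--     for row in range(len(matrix)):
--         for col in range(len(matrix[0])):
--             if pattern[row][col] in ['0', '1', '2', '3', '4', '5', '6', '7', '8', '9']:
--                 if pattern[row][col] != matrix[row][col]:
--                     return False
--             else:
--                 if pattern[row][col] not in d:
--                     if matrix[row][col] in s:
--                         return False
--                     d[pattern[row][col]] = matrix[row][col]
--                     s.add(matrix[row][col])
--                 elif d[pattern[row][col]] != matrix[row][col]: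
--                     return False
--     return True
--
-- def solution(matrix, pattern):
--     for row in range(len(matrix) - len(pattern) + 1):
--         for col in range(len(matrix[0]) - len(pattern[0]) + 1):
--             sub = []
--             for i in range(len(pattern)):
--                 sub.append(matrix[row + i][col:col + len(pattern[0])])
--             if is_match(sub, pattern):
--                 return [row, col]
--     return [-1, -1]
-- ===== SOURCE B (Python) =====
-- def _signature(flags, chars):
--     # canonical form: digit cells keep their character, letter cells get the
--     # first-occurrence index of their value
--     first = {}
--     sig = []
--     for is_digit, ch in zip(flags, chars):
--         if is_digit:
--             sig.append(ch)
--         else: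
--             if ch not in first:
--                 first[ch] = len(first)
--             sig.append(first[ch])
--     return sig
--
-- def solution(matrix, pattern):
--     h, w = len(pattern), len(pattern[0])
--     if len(matrix) < h:
--         return [-1, -1]
--     cols = len(matrix[0])
--     if cols < w:
--         return [-1, -1]
--     flags = [pattern[i][j] in '0123456789' for i in range(h) for j in range(w)]
--     psig = _signature(flags, [pattern[i][j] for i in range(h) for j in range(w)])
--     for row in range(len(matrix) - h + 1):
--         for col in range(cols - w + 1):
--             window = [matrix[row + i][col + j] for i in range(h) for j in range(w)]
--             if _signature(flags, window) == psig:
--                 return [row, col]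
--     return [-1, -1]
-- ===== Notes on version B (the rewrite author's own statement) =====
-- stated objective: alternative
-- what changed: B abandons A's incremental dict+used-value-set constraint check per placement and instead normalizes both the pattern (once, before the loops) and each window to a canonical signature (digit cells keep their character, letter cells get the first-occurrence index of their value) and compares the two signatures for equality.
-- outside the precondition, e.g. on solution(['ab', 'c'], ['zz']): A returns [1, 0], B raises IndexError; on solution(['ab', 'cd', 'x'], ['ab']): A returns [0, 0], B returns [0, 0]
import Mathlib
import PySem

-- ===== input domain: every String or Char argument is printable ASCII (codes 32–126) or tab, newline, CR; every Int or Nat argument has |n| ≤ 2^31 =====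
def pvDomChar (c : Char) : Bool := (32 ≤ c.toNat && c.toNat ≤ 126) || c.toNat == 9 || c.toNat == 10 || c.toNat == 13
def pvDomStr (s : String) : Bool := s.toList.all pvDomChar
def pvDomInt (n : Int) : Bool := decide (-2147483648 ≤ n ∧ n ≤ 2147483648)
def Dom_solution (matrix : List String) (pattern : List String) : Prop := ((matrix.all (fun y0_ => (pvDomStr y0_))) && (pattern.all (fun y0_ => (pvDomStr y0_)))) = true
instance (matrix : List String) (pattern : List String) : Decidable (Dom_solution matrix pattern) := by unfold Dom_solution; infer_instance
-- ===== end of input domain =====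

-- B replaces A's per-placement incremental dict+used-value-set consistency check by canonical
-- first-occurrence signatures: the pattern is normalized once before the loops and each window is
-- normalized and compared to it (objective: alternative).


-- shared index bookkeeping: the cell order (row-major) of the two nested Python loops
def pvCells (h w : Int) : List (Int × Int) :=
  (PySem.List.pyRange 0 h 1).flatMap (fun r => (PySem.List.pyRange 0 w 1).map (fun c => (r, c)))

-- grid[r][c] over List (List Char); Python's IndexError (only reachable outside Pre_) falls back to ' '
def pvAt (g : List (List Char)) (r c : Int) : Char :=
  match PySem.List.pyGet? g r with
  | some row => (PySem.List.pyGet? row c).getD ' '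
  | none => ' '

-- ===== PORT A =====
def pvDigits : List Char := ['0', '1', '2', '3', '4', '5', '6', '7', '8', '9']

-- is_match's nested loop: state (d, s), early 'return False' = false
def isMatchGo (sub pat : List (List Char)) (cells : List (Int × Int))
    (d : PySem.Dict Char Char) (s : PySem.Set Char) : Bool :=
  match cells with
  | [] => true
  | (r, c) :: rest =>
    let p := pvAt pat r c
    let m := pvAt sub r c
    if p ∈ pvDigits then
      if p ≠ m then false else isMatchGo sub pat rest d s
    else
      match PySem.Dict.get? d p with
      | none =>
        if PySem.Set.contains s m then false
        else isMatchGo sub pat rest (PySem.Dict.insert d p m) (PySem.Set.add s m)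
      | some v => if v ≠ m then false else isMatchGo sub pat rest d s

def isMatch (sub pat : List (List Char)) : Bool :=
  isMatchGo sub pat (pvCells (sub.length : Int) (((sub.head?.getD []).length : Int)))
    PySem.Dict.empty PySem.Set.empty

def solution (matrix : List String) (pattern : List String) : List Int :=
  let M := matrix.map String.toList
  let P := pattern.map String.toList
  let H : Int := M.length
  let W : Int := (M.head?.getD []).length
  let h : Int := P.length
  let w : Int := (P.head?.getD []).length
  ((PySem.List.pyRange 0 (H - h + 1) 1).findSome? (fun row =>
    (PySem.List.pyRange 0 (W - w + 1) 1).findSome? (fun col =>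
      let sub := (PySem.List.pyRange 0 h 1).map (fun i =>
        PySem.List.slice ((PySem.List.pyGet? M (row + i)).getD []) (some col) (some (col + w)))
      if isMatch sub P then some [row, col] else none))).getD [-1, -1]

-- ===== PORT B =====
-- _signature's loop: digit cells keep their character, letter cells get the first-occurrence
-- index of their value (first[ch] = len(first) on a fresh ch); sig built front to back
def pvSigGo (cells : List (Bool × Char)) (first : PySem.Dict Char Int) : List (Char ⊕ Int) :=
  match cells with
  | [] => []
  | (isd, ch) :: rest =>
    if isd then Sum.inl ch :: pvSigGo rest first
    else
      match PySem.Dict.get? first ch with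
      | some k => Sum.inr k :: pvSigGo rest first
      | none =>
        Sum.inr ((PySem.Dict.size first : Int)) ::
          pvSigGo rest (PySem.Dict.insert first ch ((PySem.Dict.size first : Int)))

def pvSignature (flags : List Bool) (chars : List Char) : List (Char ⊕ Int) :=
  pvSigGo (flags.zip chars) PySem.Dict.empty

def solution_alt (matrix : List String) (pattern : List String) : List Int :=
  let M := matrix.map String.toList
  let P := pattern.map String.toList
  let h : Int := P.length
  let w : Int := (P.head?.getD []).length
  if (M.length : Int) < h then [-1, -1]
  else
    let cols : Int := (M.head?.getD []).length
    if cols < w then [-1, -1]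
    else
      let flags := (PySem.List.pyRange 0 h 1).flatMap (fun i =>
        (PySem.List.pyRange 0 w 1).map (fun j => ("0123456789".toList).contains (pvAt P i j)))
      let psig := pvSignature flags ((PySem.List.pyRange 0 h 1).flatMap (fun i =>
        (PySem.List.pyRange 0 w 1).map (fun j => pvAt P i j)))
      ((PySem.List.pyRange 0 ((M.length : Int) - h + 1) 1).findSome? (fun row =>
        (PySem.List.pyRange 0 (cols - w + 1) 1).findSome? (fun col =>
          let window := (PySem.List.pyRange 0 h 1).flatMap (fun i =>
            (PySem.List.pyRange 0 w 1).map (fun j => pvAt M (row + i) (col + j)))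
          if pvSignature flags window = psig then some [row, col] else none))).getD [-1, -1]

-- ===== PRECONDITION & SPEC =====
def pvWide (g : List String) : Prop :=
  ∀ s ∈ g, ((g.head?.getD "").toList).length ≤ s.toList.length

-- Pre_ excludes the empty pattern (A raises IndexError) and inputs with a row shorter than the
-- first row of its block: on those A either raises IndexError or silently matches a truncated
-- slice against only part of the pattern; B raises IndexError where its loops reach them.
def Pre_solution (matrix : List String) (pattern : List String) : Prop :=
  pattern ≠ [] ∧
  ((matrix.length : Int) < (pattern.length : Int) ∨
    (matrix ≠ [] ∧
      (((matrix.head?.getD "").toList.length : Int) < ((pattern.head?.getD "").toList.length : Int) ∨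
        (pvWide matrix ∧ pvWide pattern))))

instance (matrix : List String) (pattern : List String) : Decidable (Pre_solution matrix pattern) := by
  unfold Pre_solution pvWide; infer_instance

def pvWitness_solution : List String × List String := (["ab", "cd"], ["xy"])

def Spec_solution (matrix : List String) (pattern : List String) (out : List Int) : Prop := out = solution_alt matrix pattern
instance (matrix : List String) (pattern : List String) (out : List Int) : Decidable (Spec_solution matrix pattern out) := by unfold Spec_solution; infer_instance

-- ===== CLAIM (what is proved, stated in full; the proofs are below) =====
def Claim_equal_solution : Prop := ∀ (matrix : List String) (pattern : List String), Dom_solution matrix pattern → Pre_solution matrix pattern → Spec_solution matrix pattern (solution matrix pattern)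

-- ===== LEMMAS AND PROOFS =====

theorem pv_findSome?_congr {α β : Type} {l : List α} {f g : α → Option β}
    (h : ∀ x ∈ l, f x = g x) : l.findSome? f = l.findSome? g := by
  induction l with
  | nil => rfl
  | cons x xs ih =>
    simp only [List.findSome?_cons, h x (by simp)]
    cases g x with
    | none => exact ih (fun y hy => h y (by simp [hy]))
    | some b => rfl

theorem pv_findSome?_none {α β : Type} (l : List α) :
    l.findSome? (fun _ => (none : Option β)) = none := by
  induction l with
  | nil => rfl
  | cons x xs ih => simp [ih]

-- abstraction of is_match's loop over the (pattern char, matrix char) pairs in cell order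
def pvAGo (L : List (Char × Char)) (d : PySem.Dict Char Char) (s : PySem.Set Char) : Bool :=
  match L with
  | [] => true
  | (p, m) :: rest =>
    if p ∈ pvDigits then
      if p ≠ m then false else pvAGo rest d s
    else
      match PySem.Dict.get? d p with
      | none =>
        if PySem.Set.contains s m then false
        else pvAGo rest (PySem.Dict.insert d p m) (PySem.Set.add s m)
      | some v => if v ≠ m then false else pvAGo rest d s

theorem isMatchGo_eq_pvAGo (sub pat : List (List Char)) (cells : List (Int × Int))
    (d : PySem.Dict Char Char) (s : PySem.Set Char) :
    isMatchGo sub pat cells d s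
      = pvAGo (cells.map (fun rc => (pvAt pat rc.1 rc.2, pvAt sub rc.1 rc.2))) d s := by
  induction cells generalizing d s with
  | nil => rfl
  | cons rc rest ih =>
    obtain ⟨r, c⟩ := rc
    show (if pvAt pat r c ∈ pvDigits then _ else _) = _
    simp only [List.map_cons, pvAGo]
    by_cases hd : pvAt pat r c ∈ pvDigits
    · rw [if_pos hd, if_pos hd]
      by_cases he : pvAt pat r c ≠ pvAt sub r c
      · rw [if_pos he, if_pos he]
      · rw [if_neg he, if_neg he, ih]
    · rw [if_neg hd, if_neg hd]
      cases heq : PySem.Dict.get? d (pvAt pat r c) with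
      | none =>
        dsimp only
        by_cases hs : PySem.Set.contains s (pvAt sub r c)
        · rw [if_pos hs, if_pos hs]
        · rw [if_neg hs, if_neg hs, ih]
      | some v =>
        dsimp only
        by_cases h3 : v ≠ pvAt sub r c
        · rw [if_pos h3, if_pos h3]
        · rw [if_neg h3, if_neg h3, ih]

-- first-occurrence index dict as an items list
def pvEnum (l : List Char) : List (Char × Int) := l.zipIdx.map (fun p => (p.1, (p.2 : Int)))

theorem pvEnum_length (l : List Char) : (pvEnum l).length = l.length := by simp [pvEnum]

theorem pvEnum_map_fst (l : List Char) : (pvEnum l).map Prod.fst = l := by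
  simp [pvEnum, List.map_map, Function.comp_def]

theorem pvEnum_append_singleton (l : List Char) (x : Char) :
    pvEnum (l ++ [x]) = pvEnum l ++ [(x, (l.length : Int))] := by
  simp [pvEnum, List.zipIdx_append]

theorem pv_flag_iff (p : Char) : (("0123456789".toList).contains p = true) ↔ p ∈ pvDigits := by
  rw [show "0123456789".toList = pvDigits from by decide]
  simp

theorem pv_keys_of_items {ν : Type} (d : PySem.Dict Char ν) (l : List (Char × ν))
    (h : d.items = l) : d.keys = l.map Prod.fst := by
  simp [PySem.Dict.keys, h]

theorem pv_get?_enum (fp : PySem.Dict Char Int) (l : List Char)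
    (h : fp.items = pvEnum l) (hnd : l.Nodup) (k : Nat) (hk : k < l.length) :
    fp.get? (l[k]'hk) = some (k : Int) := by
  apply PySem.Dict.get?_of_mem_items
  · rw [h]
    have : (l[k]'hk, k) ∈ l.zipIdx := List.mk_mem_zipIdx_iff_getElem?.mpr (by simp [hk])
    exact List.mem_map.mpr ⟨(l[k]'hk, k), this, rfl⟩
  · rw [pv_keys_of_items fp (pvEnum l) h, pvEnum_map_fst]
    exact hnd

theorem pv_get?_enum_none (fp : PySem.Dict Char Int) (l : List Char)
    (h : fp.items = pvEnum l) (x : Char) (hx : x ∉ l) : fp.get? x = none := by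
  rw [PySem.Dict.get?_eq_none_iff_not_mem_keys fp x, pv_keys_of_items fp (pvEnum l) h, pvEnum_map_fst]
  exact hx

theorem pv_size_of_items {ν : Type} (d : PySem.Dict Char ν) (l : List (Char × ν))
    (h : d.items = l) : PySem.Dict.size d = l.length := by
  simp [PySem.Dict.size, h]

-- the core: A's incremental consistency+injectivity check over the pair list equals
-- "window signature = pattern signature" computed from any state described by bs
theorem pv_core (L : List (Char × Char)) :
    ∀ (bs : List (Char × Char)) (d : PySem.Dict Char Char) (s : PySem.Set Char)
      (fp fm : PySem.Dict Char Int),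
      d.items = bs → s = bs.map Prod.snd →
      fp.items = pvEnum (bs.map Prod.fst) → fm.items = pvEnum (bs.map Prod.snd) →
      (bs.map Prod.fst).Nodup → (bs.map Prod.snd).Nodup →
      pvAGo L d s =
        decide (pvSigGo (L.map (fun pm => (("0123456789".toList).contains pm.1, pm.2))) fm
              = pvSigGo (L.map (fun pm => (("0123456789".toList).contains pm.1, pm.1))) fp) := by
  induction L with
  | nil => intros; simp [pvAGo, pvSigGo]
  | cons pm L ih =>
    rintro bs d s fp fm hd hs hfp hfm hnd1 hnd2
    obtain ⟨p, m⟩ := pm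
    simp only [List.map_cons, pvAGo, pvSigGo]
    by_cases hp : p ∈ pvDigits
    · have hflag : ("0123456789".toList).contains p = true := (pv_flag_iff p).mpr hp
      rw [if_pos hp]
      simp only [hflag, if_true]
      by_cases hpm : p = m
      · subst hpm
        rw [if_neg (by simp)]
        rw [ih bs d s fp fm hd hs hfp hfm hnd1 hnd2]
        exact (decide_eq_decide.mpr (by simp)).symm
      · rw [if_pos (by simpa using hpm)]
        exact (decide_eq_false (by simp [Ne.symm hpm])).symm
    · have hflag : ("0123456789".toList).contains p = false := by
        cases hcc : ("0123456789".toList).contains p with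
        | false => rfl
        | true => exact absurd ((pv_flag_iff p).mp hcc) hp
      rw [if_neg hp]
      simp only [hflag, Bool.false_eq_true, if_false]
      cases hg : PySem.Dict.get? d p with
      | some v =>
        dsimp only
        have hmem : (p, v) ∈ bs := hd ▸ PySem.Dict.mem_items_of_get?_eq_some d hg
        obtain ⟨k, hk, hbk⟩ := List.getElem_of_mem hmem
        have hpk : (bs.map Prod.fst)[k]'(by simpa using hk) = p := by simp [hbk]
        have hvk : (bs.map Prod.snd)[k]'(by simpa using hk) = v := by simp [hbk]
        have hfpk : fp.get? p = some (k : Int) := by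
          have := pv_get?_enum fp (bs.map Prod.fst) hfp hnd1 k (by simpa using hk)
          rwa [hpk] at this
        simp only [hfpk]
        by_cases hvm : v = m
        · have hfmk : fm.get? m = some (k : Int) := by
            have := pv_get?_enum fm (bs.map Prod.snd) hfm hnd2 k (by simpa using hk)
            rwa [hvk, hvm] at this
          simp only [hfmk]
          rw [if_neg (by simpa using hvm)]
          rw [ih bs d s fp fm hd hs hfp hfm hnd1 hnd2]
          exact (decide_eq_decide.mpr (by simp)).symm
        · rw [if_pos (by simpa using hvm)]
          by_cases hmmem : m ∈ bs.map Prod.snd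
          · obtain ⟨k', hk', hmk'⟩ := List.getElem_of_mem hmmem
            have hfmk' : fm.get? m = some (k' : Int) := by
              have := pv_get?_enum fm (bs.map Prod.snd) hfm hnd2 k' hk'
              rwa [hmk'] at this
            simp only [hfmk']
            have hkk : k' ≠ k := by
              intro hEq
              subst hEq
              exact hvm (by rw [← hvk, hmk'])
            exact (decide_eq_false (by simp [hkk])).symm
          · simp only [pv_get?_enum_none fm (bs.map Prod.snd) hfm m hmmem]
            have hsz : PySem.Dict.size fm = bs.length := by
              rw [pv_size_of_items fm _ hfm, pvEnum_length, List.length_map]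
            have hkb : (k : Int) ≠ (bs.length : Int) := by
              have : k < bs.length := hk
              omega
            exact (decide_eq_false (by simp [hsz, Ne.symm hkb])).symm
      | none =>
        dsimp only
        have hpn : p ∉ bs.map Prod.fst := by
          intro hmemp
          have : p ∈ d.keys := by rw [pv_keys_of_items d bs hd]; exact hmemp
          exact ((PySem.Dict.get?_eq_none_iff_not_mem_keys d p).mp hg) this
        have hfpn : fp.get? p = none := pv_get?_enum_none fp (bs.map Prod.fst) hfp p hpn
        simp only [hfpn]
        have hszp : PySem.Dict.size fp = bs.length := by
          rw [pv_size_of_items fp _ hfp, pvEnum_length, List.length_map]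
        by_cases hsm : PySem.Set.contains s m
        · rw [if_pos hsm]
          have hmmem : m ∈ bs.map Prod.snd := by
            rw [← hs]; exact (PySem.Set.contains_iff _ _).mp hsm
          obtain ⟨k', hk', hmk'⟩ := List.getElem_of_mem hmmem
          have hfmk' : fm.get? m = some (k' : Int) := by
            have := pv_get?_enum fm (bs.map Prod.snd) hfm hnd2 k' hk'
            rwa [hmk'] at this
          simp only [hfmk']
          have hkb : (k' : Int) ≠ (bs.length : Int) := by
            have : k' < bs.length := by simpa using hk'
            omega
          exact (decide_eq_false (by simp [hszp, hkb])).symm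
        · rw [if_neg hsm]
          have hmmem : m ∉ bs.map Prod.snd := by
            intro hx
            exact hsm ((PySem.Set.contains_iff _ _).mpr (hs ▸ hx))
          have hfmn : fm.get? m = none := pv_get?_enum_none fm (bs.map Prod.snd) hfm m hmmem
          simp only [hfmn]
          have hszm : PySem.Dict.size fm = bs.length := by
            rw [pv_size_of_items fm _ hfm, pvEnum_length, List.length_map]
          have hcontain : d.contains p = false := by
            rw [PySem.Dict.contains_eq_isSome_get?, hg]; rfl
          have hd' : (d.insert p m).items = bs ++ [(p, m)] := by
            rw [PySem.Dict.items_insert_of_not_contains d m hcontain, hd]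
          have hs' : PySem.Set.add s m = (bs ++ [(p, m)]).map Prod.snd := by
            rw [PySem.Set.add_of_not_mem (by rw [hs]; exact hmmem), hs]; simp
          have hfp' : (fp.insert p ((PySem.Dict.size fp : Int))).items
              = pvEnum ((bs ++ [(p, m)]).map Prod.fst) := by
            rw [PySem.Dict.items_insert_of_not_contains fp _
                (by rw [PySem.Dict.contains_eq_isSome_get?, hfpn]; rfl), hfp]
            simp only [List.map_append, List.map_cons, List.map_nil]
            rw [pvEnum_append_singleton, hszp]
            simp
          have hfm' : (fm.insert m ((PySem.Dict.size fm : Int))).items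
              = pvEnum ((bs ++ [(p, m)]).map Prod.snd) := by
            rw [PySem.Dict.items_insert_of_not_contains fm _
                (by rw [PySem.Dict.contains_eq_isSome_get?, hfmn]; rfl), hfm]
            simp only [List.map_append, List.map_cons, List.map_nil]
            rw [pvEnum_append_singleton, hszm]
            simp
          have hnd1' : ((bs ++ [(p, m)]).map Prod.fst).Nodup := by
            simp only [List.map_append, List.map_cons, List.map_nil]
            rw [List.nodup_append]
            exact ⟨hnd1, List.nodup_singleton p, fun a ha b hb hEq => hpn (by rw [hEq, List.mem_singleton.mp hb] at ha; exact ha)⟩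
          have hnd2' : ((bs ++ [(p, m)]).map Prod.snd).Nodup := by
            simp only [List.map_append, List.map_cons, List.map_nil]
            rw [List.nodup_append]
            exact ⟨hnd2, List.nodup_singleton m, fun a ha b hb hEq => hmmem (by rw [hEq, List.mem_singleton.mp hb] at ha; exact ha)⟩
          rw [ih (bs ++ [(p, m)]) _ _ _ _ hd' hs' hfp' hfm' hnd1' hnd2']
          exact (decide_eq_decide.mpr (by simp [hszp, hszm])).symm

-- [f i j for i in range(h) for j in range(w)] as a map over the shared cell list
theorem pv_flatMap_as_cells {α : Type} (h w : Int) (f : Int → Int → α) :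
    (PySem.List.pyRange 0 h 1).flatMap (fun i =>
      (PySem.List.pyRange 0 w 1).map (fun j => f i j))
    = (pvCells h w).map (fun rc => f rc.1 rc.2) := by
  simp [pvCells, List.map_flatMap, List.map_map, Function.comp_def]

theorem pv_row_eq (M P : List (List Char)) (row col : Int)
    (hrow0 : 0 ≤ row) (hrowU : row + (P.length : Int) ≤ (M.length : Int))
    (hcol0 : 0 ≤ col)
    (i : Int) (hi0 : 0 ≤ i) (hiU : i < (P.length : Int)) :
    PySem.List.pyGet?
      ((PySem.List.pyRange 0 (P.length : Int) 1).map (fun i =>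
        PySem.List.slice ((PySem.List.pyGet? M (row + i)).getD []) (some col)
          (some (col + ((P.head?.getD []).length : Int))))) i
    = some ((M[(row + i).toNat]'(by omega)).drop col.toNat |>.take ((P.head?.getD []).length)) := by
  have hmem : (row + i).toNat < M.length := by omega
  rw [PySem.List.pyGet?_of_nonneg _ hi0, PySem.List.pyRange_one, List.getElem?_map,
    List.getElem?_map, List.getElem?_range (by omega : i.toNat < ((P.length : Int) - 0).toNat)]
  simp only [Option.map_some]
  have h1 : (0 : Int) + (i.toNat : Int) = i := by omega
  rw [h1]
  have h2 : PySem.List.pyGet? M (row + i) = some (M[(row + i).toNat]'hmem) := by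
    rw [PySem.List.pyGet?_of_nonneg _ (by omega), List.getElem?_eq_getElem hmem]
  rw [h2]
  simp only [Option.getD_some]
  have h3 : (col + ((P.head?.getD []).length : Int)).toNat - col.toNat
      = (P.head?.getD []).length := by omega
  rw [PySem.List.slice_toNat _ hcol0 (by omega), h3]

-- one placement: A's is_match on the sliced sub-matrix equals B's signature comparison
theorem pv_placement (M P : List (List Char)) (row col : Int)
    (hP : P ≠ [])
    (hrect : ∀ L ∈ M, (M.head?.getD []).length ≤ L.length)
    (hrow0 : 0 ≤ row) (hrowU : row + (P.length : Int) ≤ (M.length : Int))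
    (hcol0 : 0 ≤ col)
    (hcolU : col + ((P.head?.getD []).length : Int) ≤ ((M.head?.getD []).length : Int)) :
    isMatch
      ((PySem.List.pyRange 0 (P.length : Int) 1).map (fun i =>
        PySem.List.slice ((PySem.List.pyGet? M (row + i)).getD []) (some col)
          (some (col + ((P.head?.getD []).length : Int))))) P
    = decide
        (pvSigGo ((pvCells (P.length : Int) ((P.head?.getD []).length : Int)).map
            (fun rc => (("0123456789".toList).contains (pvAt P rc.1 rc.2),
              pvAt M (row + rc.1) (col + rc.2)))) PySem.Dict.empty
        = pvSigGo ((pvCells (P.length : Int) ((P.head?.getD []).length : Int)).map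
            (fun rc => (("0123456789".toList).contains (pvAt P rc.1 rc.2),
              pvAt P rc.1 rc.2))) PySem.Dict.empty) := by
  set w : Nat := (P.head?.getD []).length with hw
  set hn : Nat := P.length with hh
  set sub : List (List Char) :=
    (PySem.List.pyRange 0 (hn : Int) 1).map (fun i =>
      PySem.List.slice ((PySem.List.pyGet? M (row + i)).getD []) (some col)
        (some (col + (w : Int)))) with hsub
  have hn0 : 0 < hn := by
    cases P with
    | nil => exact absurd rfl hP
    | cons a b => simp [hh]
  have hlen : sub.length = hn := by
    simp [hsub, PySem.List.length_pyRange_one]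
  have hrowlen : ∀ (k : Nat), (hk : k < M.length) → (M.head?.getD []).length ≤ M[k].length :=
    fun k hk => hrect _ (List.getElem_mem hk)
  have hhead : (sub.head?.getD []).length = w := by
    have h0 := pv_row_eq M P row col hrow0 hrowU hcol0 0 le_rfl (by omega)
    rw [PySem.List.pyGet?_of_nonneg _ le_rfl] at h0
    have hzn : ((0 : Int)).toNat = 0 := rfl
    rw [hzn] at h0
    rw [← List.head?_eq_getElem?] at h0
    rw [h0]
    simp only [Option.getD_some]
    rw [List.length_take, List.length_drop]
    have := hrowlen (row + 0).toNat (by omega)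
    omega
  have hcells : ∀ rc ∈ pvCells (hn : Int) (w : Int),
      pvAt sub rc.1 rc.2 = pvAt M (row + rc.1) (col + rc.2) := by
    rintro ⟨i, j⟩ hrc
    have hb : (0 ≤ i ∧ i < (hn : Int)) ∧ 0 ≤ j ∧ j < (w : Int) := by
      simp only [pvCells, List.mem_flatMap, List.mem_map, PySem.List.mem_pyRange_one] at hrc
      obtain ⟨r, hr, c, hc, hrc⟩ := hrc
      cases hrc
      exact ⟨hr, hc⟩
    obtain ⟨⟨hi0, hiU⟩, hj0, hjU⟩ := hb
    have hmem : (row + i).toNat < M.length := by omega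
    have hLr := hrowlen (row + i).toNat hmem
    simp only [pvAt]
    have h2 : PySem.List.pyGet? M (row + i) = some (M[(row + i).toNat]'hmem) := by
      rw [PySem.List.pyGet?_of_nonneg _ (by omega), List.getElem?_eq_getElem hmem]
    rw [pv_row_eq M P row col hrow0 hrowU hcol0 i hi0 hiU, h2]
    dsimp only
    rw [PySem.List.pyGet?_of_nonneg _ hj0, PySem.List.pyGet?_of_nonneg _ (by omega)]
    rw [List.getElem?_take_of_lt (by omega), List.getElem?_drop]
    congr 2
    omega
  have hm1 : isMatch sub P = isMatchGo sub P (pvCells (hn : Int) (w : Int))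
      PySem.Dict.empty PySem.Set.empty := by
    rw [isMatch, hlen, hhead]
  rw [hm1, isMatchGo_eq_pvAGo]
  have hmapped :
      (pvCells (hn : Int) (w : Int)).map (fun rc => (pvAt P rc.1 rc.2, pvAt sub rc.1 rc.2))
      = (pvCells (hn : Int) (w : Int)).map
          (fun rc => (pvAt P rc.1 rc.2, pvAt M (row + rc.1) (col + rc.2))) :=
    List.map_congr_left (fun rc hrc => by rw [hcells rc hrc])
  rw [hmapped]
  rw [pv_core _ [] PySem.Dict.empty PySem.Set.empty PySem.Dict.empty PySem.Dict.empty
    (by rfl) (by rfl) (by rfl) (by rfl) (by simp) (by simp)]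
  rw [List.map_map, List.map_map]
  rfl

theorem solution_spec : Claim_equal_solution := by
  intro matrix pattern hDom hPre
  obtain ⟨hPne, hcase⟩ := hPre
  unfold Spec_solution solution solution_alt
  dsimp only
  set M : List (List Char) := matrix.map String.toList with hM
  set P : List (List Char) := pattern.map String.toList with hP
  have hMlen : M.length = matrix.length := by simp [hM]
  have hPlen : P.length = pattern.length := by simp [hP]
  have hPneL : P ≠ [] := by simp [hP, hPne]
  have hheadM : M.head?.getD [] = (matrix.head?.getD "").toList := by
    cases matrix <;> simp [hM]
  have hheadP : P.head?.getD [] = (pattern.head?.getD "").toList := by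
    cases pattern <;> simp [hP]
  by_cases hlt : (M.length : Int) < (P.length : Int)
  · rw [if_pos hlt,
      show PySem.List.pyRange 0 ((M.length : Int) - (P.length : Int) + 1) 1 = [] from
        PySem.List.pyRange_one_eq_nil (by omega)]
    simp
  · rw [if_neg hlt]
    have hcase2 : matrix ≠ [] ∧
        (((matrix.head?.getD "").toList.length : Int) < ((pattern.head?.getD "").toList.length : Int) ∨
          (pvWide matrix ∧ pvWide pattern)) := by
      rcases hcase with h | h
      · exact absurd (by omega : (M.length : Int) < (P.length : Int)) hlt
      · exact h
    obtain ⟨hmne, hsub2⟩ := hcase2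
    by_cases hWw : ((M.head?.getD []).length : Int) < ((P.head?.getD []).length : Int)
    · rw [if_pos hWw]
      rw [show PySem.List.pyRange 0
          (((M.head?.getD []).length : Int) - ((P.head?.getD []).length : Int) + 1) 1 = [] from
        PySem.List.pyRange_one_eq_nil (by omega)]
      simp only [List.findSome?_nil]
      rw [pv_findSome?_none]
      simp
    · rw [if_neg hWw]
      have hwide : pvWide matrix ∧ pvWide pattern := by
        rcases hsub2 with h | h
        · exact absurd (by rw [hheadM, hheadP]; omega) hWw
        · exact h
      obtain ⟨hrm, hrp⟩ := hwide
      refine congrArg (fun z : Option (List Int) => z.getD [-1, -1]) ?_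
      apply pv_findSome?_congr
      intro row hrow
      apply pv_findSome?_congr
      intro col hcol
      rw [PySem.List.mem_pyRange_one] at hrow hcol
      have hrect' : ∀ L ∈ M, (M.head?.getD []).length ≤ L.length := by
        intro L hL
        obtain ⟨s, hs, rfl⟩ := List.mem_map.mp hL
        rw [hheadM]
        exact hrm s hs
      rw [pv_placement M P row col hPneL hrect' hrow.1 (by omega) hcol.1 (by omega)]
      rw [pv_flatMap_as_cells, pv_flatMap_as_cells, pv_flatMap_as_cells]
      unfold pvSignature
      rw [List.zip_map', List.zip_map']
      split_ifs with h1 h2 h2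
      · rfl
      · exact absurd (of_decide_eq_true h1) h2
      · exact absurd h2 (by simpa using h1)
      · rfl
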